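-- pv_equiv track=rewrite | github.com/rubendeseyn/po3-knapsack | alles3D.py | SelecteerDozen2D
-- ===== SOURCE A (Python) =====
-- def SelecteerDozen2D(dozen,maxlengte,maxbreedte):
--     selectie_dozen = []
--     for doos in dozen:
--         if doos[1]<= maxlengte and doos[2] <= maxbreedte:
--             selectie_dozen.append(doos)
--         elif doos[2] <= maxlengte and doos[1] <= maxbreedte:
--             huidige_breedte = int(doos[2])
--             huidige_lengte = int(doos[1])
--             doos[1] = huidige_breedte
--             doos[2] = huidige_lengte
--             selectie_dozen.append(doos)
--
--
--     if len(selectie_dozen)==0: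
--         overige_dozen=list(dozen)
--     else:
--         overige_dozen = []
--         for doos in dozen:
--             if doos not in selectie_dozen:
--                 overige_dozen.append(doos)
--     return selectie_dozen, overige_dozen
-- ===== SOURCE B (Python) =====
-- def _past(doos, maxlengte, maxbreedte):
--     # fits in either orientation
--     return (doos[1] <= maxlengte and doos[2] <= maxbreedte) or \
--            (doos[2] <= maxlengte and doos[1] <= maxbreedte)
--
-- def _orienteer(doos, maxlengte, maxbreedte):
--     # keep as-is when it fits directly, otherwise a fresh swapped copy
--     if doos[1] <= maxlengte and doos[2] <= maxbreedte:
--         return doos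
--     return doos[:1] + [doos[2], doos[1]] + doos[3:]
--
-- def SelecteerDozen2D(dozen, maxlengte, maxbreedte):
--     # Two comprehensions over a fits-predicate instead of A's append loop plus a
--     # second pass with a per-box membership scan. Return-value equivalent to A;
--     # unlike A it does not mutate the boxes in place.
--     selectie_dozen = [_orienteer(d, maxlengte, maxbreedte) for d in dozen
--                       if _past(d, maxlengte, maxbreedte)]
--     overige_dozen = [d for d in dozen if not _past(d, maxlengte, maxbreedte)]
--     return selectie_dozen, overige_dozen
-- ===== Notes on version B (the rewrite author's own statement) =====
-- stated objective: alternative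
-- what changed: B expresses the split as two comprehensions over a single fits-predicate (orienting each fitting box functionally), eliminating A's second full pass with its per-box 'not in selectie' membership scan and its in-place mutation.
import Mathlib
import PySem

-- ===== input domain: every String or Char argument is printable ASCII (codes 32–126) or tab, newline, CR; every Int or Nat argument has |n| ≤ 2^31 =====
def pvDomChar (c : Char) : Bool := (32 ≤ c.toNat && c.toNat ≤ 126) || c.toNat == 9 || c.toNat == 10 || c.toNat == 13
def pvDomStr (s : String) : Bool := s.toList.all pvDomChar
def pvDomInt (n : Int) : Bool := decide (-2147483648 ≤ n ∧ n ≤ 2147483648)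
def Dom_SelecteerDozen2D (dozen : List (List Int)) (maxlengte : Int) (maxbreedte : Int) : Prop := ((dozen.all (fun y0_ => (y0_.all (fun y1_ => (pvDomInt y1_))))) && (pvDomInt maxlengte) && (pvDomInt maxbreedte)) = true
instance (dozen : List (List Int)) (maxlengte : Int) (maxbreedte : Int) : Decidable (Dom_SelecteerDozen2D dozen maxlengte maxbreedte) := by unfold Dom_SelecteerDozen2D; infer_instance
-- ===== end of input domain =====

-- B splits the boxes with two comprehensions over a fits-predicate, dropping A's second pass
-- with its per-box membership scan (objective: alternative; not claimed faster).
-- A mutates swapped boxes in place; the equivalence proved here is about the RETURN value only.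

-- doos[1] / doos[2]; the 0 default is never reached under Pre_ (length ≥ 3)
def pvD1 (d : List Int) : Int := (PySem.List.pyGet? d 1).getD 0
def pvD2 (d : List Int) : Int := (PySem.List.pyGet? d 2).getD 0

-- ===== PORT A =====
-- first loop of A: builds selectie and the (mutated) dozen list
def stepA (maxlengte maxbreedte : Int) (st : List (List Int) × List (List Int)) (doos : List Int) : List (List Int) × List (List Int) :=
  if pvD1 doos ≤ maxlengte ∧ pvD2 doos ≤ maxbreedte then (st.1 ++ [doos], st.2 ++ [doos])
  else if pvD2 doos ≤ maxlengte ∧ pvD1 doos ≤ maxbreedte then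
    let d' := PySem.List.pySetD (PySem.List.pySetD doos 1 (pvD2 doos)) 2 (pvD1 doos)
    (st.1 ++ [d'], st.2 ++ [d'])
  else (st.1, st.2 ++ [doos])

def SelecteerDozen2D (dozen : List (List Int)) (maxlengte : Int) (maxbreedte : Int) : List (List Int) × List (List Int) :=
  let p := dozen.foldl (stepA maxlengte maxbreedte) ([], [])
  if p.1.length = 0 then (p.1, p.2)
  else (p.1, p.2.filter (fun doos => !(p.1.contains doos)))

-- ===== PORT B =====
-- _past: fits in either orientation
def pastB (doos : List Int) (maxlengte maxbreedte : Int) : Bool :=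
  (decide (pvD1 doos ≤ maxlengte) && decide (pvD2 doos ≤ maxbreedte)) ||
  (decide (pvD2 doos ≤ maxlengte) && decide (pvD1 doos ≤ maxbreedte))

-- _orienteer: keep, or a fresh swapped copy doos[:1] + [doos[2], doos[1]] + doos[3:]
def orienteerB (doos : List Int) (maxlengte maxbreedte : Int) : List Int :=
  if pvD1 doos ≤ maxlengte ∧ pvD2 doos ≤ maxbreedte then doos
  else PySem.List.slice doos none (some 1) ++ [pvD2 doos, pvD1 doos] ++ PySem.List.slice doos (some 3) none

-- the two comprehensions
def SelecteerDozen2D_alt (dozen : List (List Int)) (maxlengte : Int) (maxbreedte : Int) : List (List Int) × List (List Int) :=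
  ((dozen.filter (fun d => pastB d maxlengte maxbreedte)).map (fun d => orienteerB d maxlengte maxbreedte),
   dozen.filter (fun d => !(pastB d maxlengte maxbreedte)))

-- ===== PRECONDITION & SPEC =====
-- Pre_ excludes exactly the inputs where Python A raises IndexError: a box with fewer than 3 entries.
def Pre_SelecteerDozen2D (dozen : List (List Int)) (maxlengte : Int) (maxbreedte : Int) : Prop :=
  ∀ d ∈ dozen, 3 ≤ d.length
instance (dozen : List (List Int)) (maxlengte : Int) (maxbreedte : Int) : Decidable (Pre_SelecteerDozen2D dozen maxlengte maxbreedte) := by unfold Pre_SelecteerDozen2D; infer_instance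

def pvWitness_SelecteerDozen2D : List (List Int) × Int × Int := ([[1, 2, 3], [2, 9, 4], [7, 9, 9]], 5, 5)

def Spec_SelecteerDozen2D (dozen : List (List Int)) (maxlengte : Int) (maxbreedte : Int) (out : List (List Int) × List (List Int)) : Prop := out = SelecteerDozen2D_alt dozen maxlengte maxbreedte
instance (dozen : List (List Int)) (maxlengte : Int) (maxbreedte : Int) (out : List (List Int) × List (List Int)) : Decidable (Spec_SelecteerDozen2D dozen maxlengte maxbreedte out) := by unfold Spec_SelecteerDozen2D; infer_instance

-- ===== CLAIM (what is proved, stated in full; the proofs are below) =====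
def Claim_equal_SelecteerDozen2D : Prop := ∀ (dozen : List (List Int)) (maxlengte : Int) (maxbreedte : Int), Dom_SelecteerDozen2D dozen maxlengte maxbreedte → Pre_SelecteerDozen2D dozen maxlengte maxbreedte → Spec_SelecteerDozen2D dozen maxlengte maxbreedte (SelecteerDozen2D dozen maxlengte maxbreedte)

-- ===== LEMMAS AND PROOFS =====

-- the value a box has after A's first loop
def trA (ml mb : Int) (d : List Int) : List Int :=
  if pvD1 d ≤ ml ∧ pvD2 d ≤ mb then d
  else if pvD2 d ≤ ml ∧ pvD1 d ≤ mb then PySem.List.pySetD (PySem.List.pySetD d 1 (pvD2 d)) 2 (pvD1 d)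
  else d

lemma pvD1_cons (a b c : Int) (t : List Int) : pvD1 (a :: b :: c :: t) = b := by
  simp [PySem.List.pyGet?, PySem.List.pyIdx?, pvD1,
    show (0:Int) ≤ (t.length:Int) + 1 from by omega]

lemma pvD2_cons (a b c : Int) (t : List Int) : pvD2 (a :: b :: c :: t) = c := by
  simp [PySem.List.pyGet?, PySem.List.pyIdx?, pvD2,
    show (2:Int) ≤ (t.length:Int) + 1 + 1 from by omega]

lemma trA_cons (ml mb a b c : Int) (t : List Int) :
    trA ml mb (a :: b :: c :: t) = if b ≤ ml ∧ c ≤ mb then a :: b :: c :: t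
      else if c ≤ ml ∧ b ≤ mb then a :: c :: b :: t else a :: b :: c :: t := by
  simp [trA, pvD1_cons, pvD2_cons, PySem.List.pySetD, PySem.List.pySet?, PySem.List.pyIdx?,
    show (0:Int) ≤ (t.length:Int) + 1 from by omega,
    show (2:Int) ≤ (t.length:Int) + 1 + 1 from by omega, List.set]

-- on a fitting box of length ≥ 3, B's orienteer produces A's mutated value
lemma orienteer_eq_trA (ml mb : Int) (d : List Int) (hd : 3 ≤ d.length)
    (hf : pastB d ml mb = true) : orienteerB d ml mb = trA ml mb d := by
  obtain ⟨a, b, c, t, rfl⟩ : ∃ a b c t, d = a :: b :: c :: t := by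
    match d, hd with
    | a :: b :: c :: t, _ => exact ⟨a, b, c, t, rfl⟩
  simp only [pastB, pvD1_cons, pvD2_cons, Bool.or_eq_true, Bool.and_eq_true,
    decide_eq_true_eq] at hf
  rw [trA_cons]
  by_cases h1 : b ≤ ml ∧ c ≤ mb
  · simp [orienteerB, pvD1_cons, pvD2_cons, h1]
  · have h2 : c ≤ ml ∧ b ≤ mb := by
      rcases hf with hf | hf
      · exact absurd ⟨hf.1, hf.2⟩ h1
      · exact ⟨hf.1, hf.2⟩
    have hto : PySem.List.slice (a :: b :: c :: t) none (some 1) = [a] := by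
      rw [PySem.List.slice_to _ (by norm_num)]; rfl
    have hfrom : PySem.List.slice (a :: b :: c :: t) (some 3) none = t := by
      rw [PySem.List.slice_from _ (by norm_num)]; rfl
    simp [orienteerB, pvD1_cons, pvD2_cons, h1, h2, hto, hfrom]

-- every selected value fits without swapping
lemma fit1_trA (ml mb : Int) (d : List Int) (hd : 3 ≤ d.length) (hf : pastB d ml mb = true) :
    pvD1 (trA ml mb d) ≤ ml ∧ pvD2 (trA ml mb d) ≤ mb := by
  obtain ⟨a, b, c, t, rfl⟩ : ∃ a b c t, d = a :: b :: c :: t := by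
    match d, hd with
    | a :: b :: c :: t, _ => exact ⟨a, b, c, t, rfl⟩
  rw [trA_cons]
  simp only [pastB, pvD1_cons, pvD2_cons, Bool.or_eq_true, Bool.and_eq_true,
    decide_eq_true_eq] at hf
  by_cases h1 : b ≤ ml ∧ c ≤ mb
  · simpa [h1, pvD1_cons, pvD2_cons] using h1
  · have h2 : c ≤ ml ∧ b ≤ mb := by
      rcases hf with hf | hf
      · exact absurd hf h1
      · exact hf
    simpa [h1, h2, pvD1_cons, pvD2_cons] using h2

-- a non-fitting box is untouched
lemma trA_of_not_fit (ml mb : Int) (d : List Int) (hf : pastB d ml mb = false) :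
    trA ml mb d = d := by
  have h1 : ¬(pvD1 d ≤ ml ∧ pvD2 d ≤ mb) := by intro h; simp [pastB, h.1, h.2] at hf
  have h2 : ¬(pvD2 d ≤ ml ∧ pvD1 d ≤ mb) := by intro h; simp [pastB, h.1, h.2] at hf
  simp [trA, h1, h2]

-- characterisation of A's first loop
lemma foldA_char (ml mb : Int) (dozen : List (List Int)) :
    ∀ s m : List (List Int), dozen.foldl (stepA ml mb) (s, m) =
      (s ++ (dozen.filter (fun d => pastB d ml mb)).map (trA ml mb), m ++ dozen.map (trA ml mb)) := by
  induction dozen with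
  | nil => intro s m; simp
  | cons d rest ih =>
    intro s m
    by_cases h1 : pvD1 d ≤ ml ∧ pvD2 d ≤ mb
    · have hf : pastB d ml mb = true := by simp [pastB, h1.1, h1.2]
      have ht : trA ml mb d = d := by simp [trA, h1]
      simp [stepA, h1, ih, hf, ht, List.filter_cons, List.append_assoc]
    · by_cases h2 : pvD2 d ≤ ml ∧ pvD1 d ≤ mb
      · have hf : pastB d ml mb = true := by simp [pastB, h2.1, h2.2]
        have ht : trA ml mb d = PySem.List.pySetD (PySem.List.pySetD d 1 (pvD2 d)) 2 (pvD1 d) := by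
          simp [trA, h1, h2]
        simp [stepA, h1, h2, ih, hf, ht, List.filter_cons, List.append_assoc]
      · have hf : pastB d ml mb = false := by
          simp only [pastB, Bool.or_eq_false_iff, Bool.and_eq_false_iff,
            decide_eq_false_iff_not]
          constructor
          · by_cases hb : pvD1 d ≤ ml
            · exact Or.inr (fun hc => h1 ⟨hb, hc⟩)
            · exact Or.inl hb
          · by_cases hb : pvD2 d ≤ ml
            · exact Or.inr (fun hc => h2 ⟨hb, hc⟩)
            · exact Or.inl hb
        have ht : trA ml mb d = d := by simp [trA, h1, h2]
        simp [stepA, h1, h2, ih, hf, ht, List.filter_cons, List.append_assoc]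

-- the membership filter over the mutated list is exactly "keep the non-fitting boxes"
lemma filter_mut (ml mb : Int) (sel : List (List Int))
    (hsel : ∀ v ∈ sel, pvD1 v ≤ ml ∧ pvD2 v ≤ mb) :
    ∀ dozen : List (List Int), (∀ d ∈ dozen, pastB d ml mb = true → trA ml mb d ∈ sel) →
      (dozen.map (trA ml mb)).filter (fun v => !(decide (v ∈ sel))) =
        dozen.filter (fun d => !(pastB d ml mb)) := by
  intro dozen
  induction dozen with
  | nil => intro _; simp
  | cons d rest ih =>
    intro h
    have hrest : ∀ d ∈ rest, pastB d ml mb = true → trA ml mb d ∈ sel :=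
      fun x hx => h x (by simp [hx])
    by_cases hf : pastB d ml mb = true
    · have hmem : trA ml mb d ∈ sel := h d (by simp) hf
      simp [List.filter_cons, hf, hmem]
      exact ih hrest
    · have hf' : pastB d ml mb = false := by simpa using hf
      have heq : trA ml mb d = d := trA_of_not_fit ml mb d hf'
      have hnm : d ∉ sel := by
        intro hm
        have := hsel d hm
        simp [pastB, this.1, this.2] at hf'
      simp [List.filter_cons, heq, hf', hnm]
      exact ih hrest

-- under "nothing fits", A's first loop leaves every box unchanged
lemma map_trA_id (ml mb : Int) (l : List (List Int)) (h : ∀ d ∈ l, pastB d ml mb = false) :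
    l.map (trA ml mb) = l := by
  induction l with
  | nil => rfl
  | cons x xs ih =>
    simp [trA_of_not_fit ml mb x (h x (by simp)), ih (fun d hd => h d (by simp [hd]))]

lemma filter_nonfit_id (ml mb : Int) (l : List (List Int)) (h : ∀ d ∈ l, pastB d ml mb = false) :
    l.filter (fun d => !(pastB d ml mb)) = l := by
  induction l with
  | nil => rfl
  | cons x xs ih =>
    simp [List.filter_cons, h x (by simp), ih (fun d hd => h d (by simp [hd]))]

-- ===== VERDICT (by name: the statement is the Claim_ definition above) =====
theorem SelecteerDozen2D_spec : Claim_equal_SelecteerDozen2D := by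
  intro dozen ml mb _ hpre
  unfold Spec_SelecteerDozen2D SelecteerDozen2D SelecteerDozen2D_alt
  rw [foldA_char]
  simp only [List.nil_append]
  set sel := (dozen.filter (fun d => pastB d ml mb)).map (trA ml mb) with hsel_def
  have hselB : (dozen.filter (fun d => pastB d ml mb)).map (fun d => orienteerB d ml mb) = sel := by
    rw [hsel_def]
    apply List.map_congr_left
    intro d hd
    rw [List.mem_filter] at hd
    exact orienteer_eq_trA ml mb d (hpre d hd.1) hd.2
  rw [hselB]
  have hsel : ∀ v ∈ sel, pvD1 v ≤ ml ∧ pvD2 v ≤ mb := by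
    intro v hv
    rw [hsel_def, List.mem_map] at hv
    obtain ⟨d, hd, rfl⟩ := hv
    rw [List.mem_filter] at hd
    exact fit1_trA ml mb d (hpre d hd.1) hd.2
  by_cases hz : sel.length = 0
  · have hfe : dozen.filter (fun d => pastB d ml mb) = [] := by
      rw [hsel_def] at hz; simpa using hz
    have hall : ∀ d ∈ dozen, pastB d ml mb = false := by
      intro d hd
      by_contra hc
      have : d ∈ dozen.filter (fun d => pastB d ml mb) :=
        List.mem_filter.mpr ⟨hd, by simpa using hc⟩
      simp [hfe] at this
    have hmap : dozen.map (trA ml mb) = dozen := map_trA_id ml mb dozen hall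
    have hfilt : dozen.filter (fun d => !(pastB d ml mb)) = dozen :=
      filter_nonfit_id ml mb dozen hall
    simp [hz, hmap, hfilt]
  · have hmemsel : ∀ d ∈ dozen, pastB d ml mb = true → trA ml mb d ∈ sel := by
      intro d hd hf
      rw [hsel_def, List.mem_map]
      exact ⟨d, List.mem_filter.mpr ⟨hd, hf⟩, rfl⟩
    simp [hz]
    exact filter_mut ml mb sel hsel dozen hmemsel
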